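-- pv_equiv track=rewrite | github.com/Ayukha/Programs | String/palindromicstring.py | all_palindromes
-- ===== SOURCE A (Python) =====
-- def check_palin(word):
--     for i in range(len(word)//2):
--         if word[i] != word[-1*(i+1)]:
--             return False
--     return True
--
-- def all_palindromes(Word):
--
--     left,right=0,len(Word)
--     j=right
--     results=[]
--
--     while left < right-1:
--         temp = Word[left:j]
--         j-=1
--
--         if check_palin(temp):
--             results.append(temp)
--
--         if j<left+2:
--             left+=1
--             j=right
--
--     return list(set(results))
-- ===== SOURCE B (Python) =====
-- def all_palindromes(Word):
--     n = len(Word)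
--     pal = [False] * (n * n)
--     for L in range(1, n + 1):
--         for i in range(0, n - L + 1):
--             j = i + L - 1
--             if Word[i] == Word[j] and (L <= 2 or pal[(i + 1) * n + (j - 1)]):
--                 pal[i * n + j] = True
--     seen = set()
--     for i in range(n):
--         for L in range(n - i, 1, -1):
--             if pal[i * n + (i + L - 1)]:
--                 seen.add(Word[i:i + L])
--     return list(seen)
-- ===== Notes on version B (the rewrite author's own statement) =====
-- stated objective: faster
-- what changed: A rescans every substring character-by-character, doing O(n^3) work over all O(n^2) substrings; B fills an O(n^2) dynamic-programming table of palindromic spans by increasing length and then reads it off, collecting the same distinct palindromic substrings of length at least 2.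
import Mathlib
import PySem

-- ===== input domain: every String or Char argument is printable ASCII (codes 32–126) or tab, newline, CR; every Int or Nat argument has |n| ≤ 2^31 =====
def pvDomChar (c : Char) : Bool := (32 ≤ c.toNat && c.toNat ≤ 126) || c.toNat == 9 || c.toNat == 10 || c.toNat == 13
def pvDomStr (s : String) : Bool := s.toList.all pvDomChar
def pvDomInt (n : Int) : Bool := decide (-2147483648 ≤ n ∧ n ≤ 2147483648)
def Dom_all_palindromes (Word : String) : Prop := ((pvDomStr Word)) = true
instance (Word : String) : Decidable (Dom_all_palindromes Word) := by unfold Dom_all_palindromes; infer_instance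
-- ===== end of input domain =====

-- B replaces A's per-substring palindrome rescan by a dynamic-programming table of palindromic
-- spans (expand-by-length recurrence), collecting the same distinct substrings of length >= 2.

-- ===== PORT A =====
def check_palin (word : String) : Bool :=
  -- 'for i in range(len(word)//2): if word[i] != word[-1*(i+1)]: return False / return True'
  -- (an early 'return False' from a pure comparison loop = List.all)
  (PySem.List.pyRange 0 (PySem.Int.floordiv (PySem.Str.len word) 2) 1).all
    (fun i => PySem.List.pyGetD word.toList i ' ' == PySem.List.pyGetD word.toList (-1*(i+1)) ' ')

-- A's while-loop over the mutable state (left, j, results)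
def aLoop (Word : String) (right : Int) (left j : Int) (results : List String) : List String :=
  if left < right - 1 then
    let temp := PySem.Str.slice Word (some left) (some j)
    let j' := j - 1
    let results' := if check_palin temp then results ++ [temp] else results
    if j' < left + 2 then aLoop Word right (left+1) right results'
    else aLoop Word right left j' results'
  else results
termination_by ((right - 1 - left).toNat, (j - left).toNat)
decreasing_by
  · apply Prod.Lex.left; omega
  · apply Prod.Lex.right'; omega; omega

def all_palindromes (Word : String) : List String :=
  let right : Int := PySem.Str.len Word
  PySem.Set.ofList (aLoop Word right 0 right [])

-- ===== PORT B =====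
def all_palindromes_alt (Word : String) : List String :=
  let cs := Word.toList
  let n : Int := PySem.Str.len Word
  let pal0 : List Bool := List.replicate (n*n).toNat false
  let pal := (PySem.List.pyRange 1 (n+1) 1).foldl (fun pal L =>
      (PySem.List.pyRange 0 (n - L + 1) 1).foldl (fun pal i =>
        let j := i + L - 1
        if PySem.List.pyGetD cs i ' ' == PySem.List.pyGetD cs j ' ' &&
           (decide (L ≤ 2) || PySem.List.pyGetD pal ((i+1)*n + (j-1)) false)
        then PySem.List.pySetD pal (i*n + j) true else pal) pal) pal0
  (PySem.List.pyRange 0 n 1).foldl (fun seen i =>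
      (PySem.List.pyRange (n - i) 1 (-1)).foldl (fun seen L =>
        if PySem.List.pyGetD pal (i*n + (i + L - 1)) false
        then PySem.Set.add seen (PySem.Str.slice Word (some i) (some (i + L)))
        else seen) seen) PySem.Set.empty

-- ===== PRECONDITION & SPEC =====
def Spec_all_palindromes (Word : String) (out : List String) : Prop := out = all_palindromes_alt Word
instance (Word : String) (out : List String) : Decidable (Spec_all_palindromes Word out) := by unfold Spec_all_palindromes; infer_instance

-- ===== CLAIM (what is proved, stated in full; the proofs are below) =====
def Claim_equal_all_palindromes : Prop := ∀ (Word : String), Dom_all_palindromes Word → Spec_all_palindromes Word (all_palindromes Word)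

-- ===== LEMMAS AND PROOFS =====

def pvPal (l : List Char) : Bool := decide (l = l.reverse)

def pvSubstr (cs : List Char) (i j : Nat) : List Char := (cs.drop i).take (j - i)

theorem beq_char (a b : Char) : (a == b) = decide (a = b) := by
  by_cases h : a = b <;> simp [h]

theorem pv_flat_index {N a b c d : Nat} (hb : b < N) (hd : d < N)
    (h : a*N + b = c*N + d) : a = c ∧ b = d := by
  have key : ∀ x y u v : Nat, y < N → x < u → x*N + y < u*N + v := by
    intro x y u v hy hxu
    have h1 : (x+1)*N ≤ u*N := Nat.mul_le_mul_right N hxu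
    have h2 : (x+1)*N = x*N + N := by ring
    omega
  rcases Nat.lt_trichotomy a c with h'|h'|h'
  · exact absurd h (Nat.ne_of_lt (key a b c d hb h'))
  · subst h'; omega
  · exact absurd h.symm (Nat.ne_of_lt (key c d a b hd h'))

theorem pvPal_cons_concat (a b : Char) (m : List Char) :
    pvPal (a :: (m ++ [b])) = ((a == b) && pvPal m) := by
  rw [beq_char, pvPal, pvPal, ← Bool.decide_and, decide_eq_decide]
  simp only [List.reverse_cons, List.reverse_append, List.reverse_cons, List.reverse_nil,
    List.nil_append, List.cons_append, List.cons.injEq]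
  constructor
  · rintro ⟨h1, h2⟩
    subst h1
    exact ⟨rfl, by have := List.append_inj_left' h2 (by simp); exact this⟩
  · rintro ⟨h1, h2⟩
    subst h1
    exact ⟨rfl, by rw [← h2]⟩

theorem pvSubstr_decomp (cs : List Char) (i j : Nat) (hij : i < j) (hj : j < cs.length) :
    pvSubstr cs i (j+1) = cs[i]'(by omega) :: (pvSubstr cs (i+1) j ++ [cs[j]]) := by
  unfold pvSubstr
  rw [List.drop_eq_getElem_cons (by omega)]
  have h1 : j + 1 - i = (j - i - 1) + 1 + 1 := by omega
  have h2 : j - (i+1) = j - i - 1 := by omega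
  have hidx : i + 1 + (j - i - 1) = j := by omega
  rw [h1, h2, List.take_succ_cons, List.take_add_one]
  rw [List.getElem?_drop, hidx, List.getElem?_eq_getElem hj]
  simp

theorem pvPal_rec (cs : List Char) (i j : Nat) (hij : i < j) (hj : j < cs.length) :
    pvPal (pvSubstr cs i (j+1)) = ((cs[i]'(by omega) == cs[j]) && pvPal (pvSubstr cs (i+1) j)) := by
  rw [pvSubstr_decomp cs i j hij hj, pvPal_cons_concat]

theorem pvSubstr_single (cs : List Char) (i : Nat) (hi : i < cs.length) :
    pvSubstr cs i (i+1) = [cs[i]] := by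
  unfold pvSubstr
  have h1 : i+1-i = 1 := by omega
  rw [h1, List.take_one, List.head?_drop, List.getElem?_eq_getElem hi]
  rfl

-- one write of B's table fill: start i, span L

theorem pvPal_nil : pvPal [] = true := by simp [pvPal]

theorem pvSubstr_empty (cs : List Char) (i : Nat) : pvSubstr cs i i = [] := by
  unfold pvSubstr
  simp

-- the condition B tests before writing entry (K, K+L-1) is palindromicity of that substring

theorem pv_getElem_idx {α : Type} (l : List α) (i j : Nat) (h : i = j) (hi : i < l.length) :
    l[i] = l[j]'(h ▸ hi) := by subst h; rfl

theorem pvPal_iff_half (l : List Char) :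
    pvPal l = true ↔ ∀ k : Nat, (hk : k < l.length / 2) → l[k]'(by omega) = l[l.length - 1 - k]'(by omega) := by
  unfold pvPal
  rw [decide_eq_true_eq]
  constructor
  · intro h k hk
    calc l[k]'(by omega) = l.reverse[k]'(by simp; omega) := List.getElem_of_eq h _
      _ = l[l.length - 1 - k]'(by omega) := List.getElem_reverse _
  · intro h
    apply List.ext_getElem (by simp)
    intro k hk hk'
    rw [List.getElem_reverse]
    rcases Nat.lt_trichotomy k (l.length - 1 - k) with hc|hc|hc
    · exact h k (by omega)
    · exact pv_getElem_idx l k _ hc hk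
    · calc l[k] = l[l.length - 1 - (l.length - 1 - k)]'(by omega) := pv_getElem_idx l k _ (by omega) hk
        _ = l[l.length - 1 - k]'(by omega) := (h (l.length - 1 - k) (by omega)).symm

theorem check_palin_eq (w : String) : check_palin w = pvPal w.toList := by
  rw [Bool.eq_iff_iff, pvPal_iff_half]
  unfold check_palin
  rw [List.all_eq_true]
  constructor
  · intro h k hk
    have hN : (PySem.Str.len w) = (w.toList.length : Int) := PySem.Str.len_eq w
    have hmem : (k : Int) ∈ PySem.List.pyRange 0 (PySem.Int.floordiv (PySem.Str.len w) 2) 1 := by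
      rw [PySem.List.mem_pyRange_one, hN]
      have : PySem.Int.floordiv ((w.toList.length : Nat) : Int) ((2:Nat):Int) = ((w.toList.length / 2 : Nat) : Int) :=
        PySem.Int.floordiv_natCast _ 2
      push_cast at this ⊢
      omega
    have := h (k : Int) hmem
    rw [PySem.List.pyGetD_natCast] at this
    have hneg : (-1 * ((k:Int)+1)) = -(((k+1 : Nat)):Int) := by push_cast; ring
    rw [hneg, PySem.List.pyGetD_neg_natCast _ _ _ (by omega) (by omega), beq_char, decide_eq_true_eq] at this
    rw [List.getD_eq_getElem _ _ (by omega)] at this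
    convert this using 2
    omega
  · intro h i hi
    rw [PySem.List.mem_pyRange_one] at hi
    have hN : (PySem.Str.len w) = (w.toList.length : Int) := PySem.Str.len_eq w
    have hflo : PySem.Int.floordiv ((w.toList.length : Nat) : Int) ((2:Nat):Int) = ((w.toList.length / 2 : Nat) : Int) :=
      PySem.Int.floordiv_natCast _ 2
    rw [hN] at hi
    push_cast at hflo
    have hik : i = (i.toNat : Int) := by omega
    have hk2 : i.toNat < w.toList.length / 2 := by omega
    rw [hik, PySem.List.pyGetD_natCast]
    have hneg : (-1 * ((i.toNat:Int)+1)) = -(((i.toNat+1 : Nat)):Int) := by push_cast; ring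
    rw [hneg, PySem.List.pyGetD_neg_natCast _ _ _ (by omega) (by omega), beq_char, decide_eq_true_eq]
    rw [List.getD_eq_getElem _ _ (by omega)]
    convert h i.toNat hk2 using 2
    omega

def pvRowPart (Word : String) (l j : Int) : List String :=
  ((PySem.List.pyRange j (l+1) (-1)).filter
      (fun j => check_palin (PySem.Str.slice Word (some l) (some j)))).map
    (fun j => PySem.Str.slice Word (some l) (some j))

def pvRow (Word : String) (l : Int) : List String := pvRowPart Word l (PySem.Str.len Word)

def pvRest (Word : String) (l : Int) : List String :=
  (PySem.List.pyRange l (PySem.Str.len Word - 1) 1).flatMap (pvRow Word)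

theorem pvRowPart_cons (Word : String) (l j : Int) (h : l + 1 < j) :
    pvRowPart Word l j = (if check_palin (PySem.Str.slice Word (some l) (some j))
        then [PySem.Str.slice Word (some l) (some j)] else []) ++ pvRowPart Word l (j-1) := by
  unfold pvRowPart
  rw [PySem.List.pyRange_neg_one_cons h, List.filter_cons]
  by_cases hc : check_palin (PySem.Str.slice Word (some l) (some j)) <;> simp [hc]

theorem pvRowPart_last (Word : String) (l : Int) : pvRowPart Word l (l+1) = [] := by
  unfold pvRowPart
  rw [PySem.List.pyRange_neg_one_eq_nil (le_refl _)]
  rfl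

theorem aLoop_eq (Word : String) (l j : Int) (acc : List String)
    (h1 : l < PySem.Str.len Word - 1) (h2 : l + 2 ≤ j) (h3 : j ≤ PySem.Str.len Word) :
    aLoop Word (PySem.Str.len Word) l j acc = acc ++ pvRowPart Word l j ++ pvRest Word (l+1) := by
  rw [aLoop, if_pos h1]
  simp only []
  by_cases hcase : j - 1 < l + 2
  · have hj : j = l + 2 := by omega
    subst hj
    rw [if_pos hcase]
    rw [pvRowPart_cons Word l (l+2) (by omega)]
    have : l + 2 - 1 = l + 1 := by omega
    rw [this, pvRowPart_last]
    by_cases h1' : l + 1 < PySem.Str.len Word - 1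
    · rw [aLoop_eq Word (l+1) (PySem.Str.len Word) _ h1' (by omega) (le_refl _)]
      unfold pvRest
      rw [PySem.List.pyRange_one_cons h1', List.flatMap_cons]
      unfold pvRow
      by_cases hc : check_palin (PySem.Str.slice Word (some l) (some (l+2))) <;> simp [hc]
    · rw [aLoop, if_neg h1']
      unfold pvRest
      rw [PySem.List.pyRange_one_eq_nil (by omega)]
      by_cases hc : check_palin (PySem.Str.slice Word (some l) (some (l+2))) <;> simp [hc]
  · rw [if_neg hcase]
    rw [aLoop_eq Word l (j-1) _ h1 (by omega) (by omega)]
    rw [pvRowPart_cons Word l j (by omega)]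
    by_cases hc : check_palin (PySem.Str.slice Word (some l) (some j)) <;> simp [hc]
termination_by ((PySem.Str.len Word - 1 - l).toNat, (j - l).toNat)
decreasing_by
  · apply Prod.Lex.left; omega
  · apply Prod.Lex.right'; omega; omega

theorem a_eq_canon (Word : String) : all_palindromes Word = PySem.Set.ofList (pvRest Word 0) := by
  unfold all_palindromes
  simp only []
  by_cases h : (2:Int) ≤ PySem.Str.len Word
  · rw [aLoop_eq Word 0 (PySem.Str.len Word) [] (by omega) (by omega) (le_refl _)]
    rw [show pvRest Word 0 = pvRow Word 0 ++ pvRest Word 1 from by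
      unfold pvRest
      rw [PySem.List.pyRange_one_cons (show (0:Int) < PySem.Str.len Word - 1 by omega), List.flatMap_cons]
      rfl]
    rw [List.nil_append]
    rfl
  · have hN : (0:Int) ≤ PySem.Str.len Word := by rw [PySem.Str.len_eq]; positivity
    rw [aLoop, if_neg (by omega)]
    unfold pvRest
    rw [PySem.List.pyRange_one_eq_nil (by omega)]
    rfl

def pvStep (cs : List Char) (n L : Int) (pal : List Bool) (i : Int) : List Bool :=
  let j := i + L - 1
  if PySem.List.pyGetD cs i ' ' == PySem.List.pyGetD cs j ' ' &&
     (decide (L ≤ 2) || PySem.List.pyGetD pal ((i+1)*n + (j-1)) false)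
  then PySem.List.pySetD pal (i*n + j) true else pal

-- the inner loop of B's table fill (span L, first K start positions)

def tblInner (cs : List Char) (n : Int) (L : Int) (pal : List Bool) (K : Int) : List Bool :=
  (PySem.List.pyRange 0 K 1).foldl (pvStep cs n L) pal

-- B's table after processing spans 1..M-1

def tblAll (cs : List Char) (n : Int) (M : Int) : List Bool :=
  (PySem.List.pyRange 1 M 1).foldl (fun pal L => tblInner cs n L pal (n - L + 1))
    (List.replicate (n*n).toNat false)

def pvInv (cs : List Char) (L : Nat) (pal : List Bool) : Prop :=
  pal.length = cs.length * cs.length ∧ ∀ i j : Nat, i ≤ j → j < cs.length →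
    pal.getD (i*cs.length+j) false
      = if j+1-i ≤ L then pvPal (pvSubstr cs i (j+1)) else false

def pvInvRow (cs : List Char) (L K : Nat) (pal : List Bool) : Prop :=
  pal.length = cs.length * cs.length ∧ ∀ i j : Nat, i ≤ j → j < cs.length →
    pal.getD (i*cs.length+j) false
      = if j+1-i ≤ L-1 then pvPal (pvSubstr cs i (j+1))
        else if j+1-i = L ∧ i < K then pvPal (pvSubstr cs i (j+1)) else false

theorem pvStep_cond (cs : List Char) (L : Nat) (pal : List Bool) (K : Nat)
    (hL1 : 1 ≤ L) (hKL : K + L ≤ cs.length) (h : pvInvRow cs L K pal) :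
    ((PySem.List.pyGetD cs (K:Int) ' ' == PySem.List.pyGetD cs ((K:Int) + (L:Int) - 1) ' ') &&
      (decide ((L:Int) ≤ 2) || PySem.List.pyGetD pal (((K:Int)+1)*(cs.length:Int) + ((K:Int) + (L:Int) - 1 - 1)) false))
      = pvPal (pvSubstr cs K (K+L)) := by
  obtain ⟨hlen, hent⟩ := h
  have hj : (K:Int) + (L:Int) - 1 = ((K+L-1 : Nat) : Int) := by omega
  have hc1 : PySem.List.pyGetD cs (K:Int) ' ' = cs[K]'(by omega) := by
    rw [PySem.List.pyGetD_natCast, List.getD_eq_getElem _ _ (by omega)]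
  have hc2 : PySem.List.pyGetD cs ((K:Int) + (L:Int) - 1) ' ' = cs[K+L-1]'(by omega) := by
    rw [hj, PySem.List.pyGetD_natCast, List.getD_eq_getElem _ _ (by omega)]
  rw [hc1, hc2]
  rcases Nat.lt_or_ge L 3 with hL3 | hL3
  · have htrue : decide ((L:Int) ≤ 2) = true := by simp; omega
    rw [htrue, Bool.true_or, Bool.and_true]
    rcases Nat.lt_or_ge L 2 with hL2 | hL2
    · have hLe : L = 1 := by omega
      subst hLe
      simp only [show K + 1 - 1 = K from rfl]
      rw [pvSubstr_single cs K (by omega)]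
      simp [pvPal]
    · have hLe : L = 2 := by omega
      subst hLe
      simp only [show K + 2 - 1 = K + 1 from rfl]
      have hr := pvPal_rec cs K (K+1) (by omega) (by omega)
      rw [show K + 1 + 1 = K + 2 from rfl] at hr
      rw [hr, pvSubstr_empty, pvPal_nil, Bool.and_true]
  · have hfalse : decide ((L:Int) ≤ 2) = false := by simp; omega
    rw [hfalse, Bool.false_or]
    have hidx : ((K:Int)+1)*(cs.length:Int) + ((K:Int) + (L:Int) - 1 - 1)
        = (((K+1)*cs.length + (K+L-2) : Nat) : Int) := by push_cast; omega
    rw [hidx, PySem.List.pyGetD_natCast]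
    rw [hent (K+1) (K+L-2) (by omega) (by omega)]
    rw [if_pos (by omega)]
    simp only [show K+L-2+1 = K+L-1 from by omega]
    have hr := pvPal_rec cs K (K+L-1) (by omega) (by omega)
    rw [show K + L - 1 + 1 = K + L from by omega] at hr
    rw [hr]

theorem pvStep_inv (cs : List Char) (L : Nat) (pal : List Bool) (K : Nat)
    (hL1 : 1 ≤ L) (hKL : K + L ≤ cs.length) (h : pvInvRow cs L K pal) :
    pvInvRow cs L (K+1) (pvStep cs (cs.length : Int) (L : Int) pal (K : Int)) := by
  obtain ⟨hlen, hent⟩ := h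
  have hcond := pvStep_cond cs L pal K hL1 hKL ⟨hlen, hent⟩
  unfold pvStep
  simp only []
  rw [hcond]
  have hwidx : (K:Int)*(cs.length:Int) + ((K:Int) + (L:Int) - 1)
      = ((K*cs.length + (K+L-1) : Nat) : Int) := by push_cast; omega
  rw [hwidx, PySem.List.pySetD_natCast]
  have hb : K*cs.length + (K+L-1) < pal.length := by
    rw [hlen]
    have hb1 : (K+1)*cs.length ≤ cs.length*cs.length := Nat.mul_le_mul_right _ (by omega)
    have hb2 : (K+1)*cs.length = K*cs.length + cs.length := by ring
    omega
  by_cases hc : pvPal (pvSubstr cs K (K+L)) = true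
  · rw [if_pos hc]
    refine ⟨by rw [List.length_set]; exact hlen, ?_⟩
    intro i j hij hj
    rw [List.getD_eq_getElem?_getD, List.getElem?_set]
    by_cases heq : K*cs.length + (K+L-1) = i*cs.length + j
    · obtain ⟨hiK, hjK⟩ := pv_flat_index (b := K+L-1) (d := j) (by omega) (by omega) heq
      rw [if_pos heq, if_pos hb]
      simp only [Option.getD_some]
      rw [if_neg (by omega), if_pos (by omega)]
      have h2 : j + 1 = K + L := by omega
      rw [← hiK, h2, hc]
    · rw [if_neg heq, ← List.getD_eq_getElem?_getD, hent i j hij hj]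
      by_cases hsp : j+1-i ≤ L-1
      · rw [if_pos hsp, if_pos hsp]
      · rw [if_neg hsp, if_neg hsp]
        by_cases hsp2 : j+1-i = L ∧ i < K
        · rw [if_pos hsp2, if_pos ⟨hsp2.1, by omega⟩]
        · rw [if_neg hsp2, if_neg (by
            rintro ⟨he1, he2⟩
            rcases Nat.lt_or_ge i K with hx | hx
            · exact hsp2 ⟨he1, hx⟩
            · have hiK : i = K := by omega
              have hjK : j = K + L - 1 := by omega
              exact heq (by rw [hiK, hjK]))]
  · rw [if_neg hc]
    rw [Bool.not_eq_true] at hc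
    refine ⟨hlen, ?_⟩
    intro i j hij hj
    rw [hent i j hij hj]
    by_cases hsp : j+1-i ≤ L-1
    · rw [if_pos hsp, if_pos hsp]
    · rw [if_neg hsp, if_neg hsp]
      by_cases hsp2 : j+1-i = L ∧ i < K
      · rw [if_pos hsp2, if_pos ⟨hsp2.1, by omega⟩]
      · rw [if_neg hsp2]
        by_cases hsp3 : j+1-i = L ∧ i < K+1
        · rw [if_pos hsp3]
          have h1 : i = K := by omega
          have h2 : j + 1 = K + L := by omega
          rw [h1, h2, hc]
        · rw [if_neg hsp3]

theorem tblInner_inv (cs : List Char) (L : Nat) (pal : List Bool) (K : Nat)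
    (hL1 : 1 ≤ L) (hKL : K + L ≤ cs.length + 1) (h : pvInvRow cs L 0 pal) :
    pvInvRow cs L K (tblInner cs (cs.length : Int) (L : Int) pal (K : Int)) := by
  induction K with
  | zero =>
    unfold tblInner
    simp only [Nat.cast_zero]
    rw [PySem.List.pyRange_one_eq_nil (le_refl _)]
    exact h
  | succ K ih =>
    have : tblInner cs (cs.length : Int) (L : Int) pal ((K+1 : Nat) : Int)
        = pvStep cs (cs.length : Int) (L : Int) (tblInner cs (cs.length : Int) (L : Int) pal (K : Int)) (K : Int) := by
      unfold tblInner
      rw [show ((K+1 : Nat) : Int) = (K:Int) + 1 from by push_cast; ring]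
      rw [PySem.List.pyRange_one_succ_right (by positivity), List.foldl_append]
      rfl
    rw [this]
    have hinv := ih (by omega)
    have := pvStep_inv cs L _ K hL1 (by omega) hinv
    have hmono : ∀ q, pvInvRow cs L (K+1) q → pvInvRow cs L (K+1) q := fun _ h => h
    exact this

theorem pv_sq_toNat (N : Nat) : (((N:Int)) * ((N:Int))).toNat = N * N := by
  rw [show ((N:Int) * (N:Int)) = ((N*N : Nat) : Int) from by push_cast; ring, Int.toNat_natCast]

theorem tblAll_inv (cs : List Char) (M : Nat) (hM : M ≤ cs.length) :
    pvInv cs M (tblAll cs (cs.length : Int) ((M:Int)+1)) := by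
  induction M with
  | zero =>
    unfold tblAll
    rw [PySem.List.pyRange_one_eq_nil (by omega)]
    simp only [List.foldl_nil]
    refine ⟨by rw [List.length_replicate, pv_sq_toNat], ?_⟩
    intro i j hij hj
    rw [List.getD_eq_getElem?_getD, List.getElem?_replicate]
    have hni : ¬ (j+1-i ≤ 0) := by omega
    rw [if_neg hni]
    split <;> rfl
  | succ M ih =>
    have hstep : tblAll cs (cs.length : Int) (((M+1:Nat):Int)+1)
        = tblInner cs (cs.length : Int) ((M:Int)+1) (tblAll cs (cs.length : Int) ((M:Int)+1))
            ((cs.length - M : Nat) : Int) := by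
      unfold tblAll
      rw [show (((M+1:Nat):Int)+1) = ((M:Int)+1) + 1 from by push_cast; ring]
      rw [PySem.List.pyRange_one_succ_right (by omega), List.foldl_append]
      simp only [List.foldl_cons, List.foldl_nil]
      congr 1
      omega
    rw [hstep]
    have hrow0 : pvInvRow cs (M+1) 0 (tblAll cs (cs.length : Int) ((M:Int)+1)) := by
      obtain ⟨hlen, hent⟩ := ih (by omega)
      refine ⟨hlen, ?_⟩
      intro i j hij hj
      rw [hent i j hij hj]
      by_cases hsp : j+1-i ≤ M
      · rw [if_pos hsp, if_pos (by omega)]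
      · rw [if_neg hsp, if_neg (show ¬(j+1-i = M+1 ∧ i < 0) from fun hcon => absurd hcon.2 (by omega)), if_neg (show ¬(j+1-i ≤ M+1-1) from by omega)]
    have hres := tblInner_inv cs (M+1) _ (cs.length - M) (by omega) (by omega) hrow0
    rw [show (((M+1:Nat)):Int) = (M:Int)+1 from by push_cast; ring] at hres
    obtain ⟨hlen, hent⟩ := hres
    refine ⟨hlen, ?_⟩
    intro i j hij hj
    rw [hent i j hij hj]
    by_cases hsp : j+1-i ≤ M+1-1
    · simp only [hsp, if_pos]
      rw [if_pos (by omega)]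
    · by_cases hsp2 : j+1-i = M+1 ∧ i < cs.length - M
      · rw [if_neg hsp, if_pos hsp2, if_pos (by omega)]
      · rw [if_neg hsp, if_neg hsp2, if_neg (by omega)]

theorem pv_foldl_add_if {β α : Type} [BEq α] (xs : List β) (p : β → Bool) (f : β → α) (s : PySem.Set α) :
    xs.foldl (fun s x => if p x then PySem.Set.add s (f x) else s) s
      = PySem.Set.update s ((xs.filter p).map f) := by
  induction xs generalizing s with
  | nil => rfl
  | cons x xs ih =>
    rw [List.foldl_cons, List.filter_cons]
    by_cases hp : p x
    · rw [if_pos hp, if_pos hp, ih]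
      simp [PySem.Set.update]
    · rw [if_neg (by simp [hp]), if_neg (by simp [hp]), ih]

theorem pv_update_append {α : Type} [BEq α] (s : PySem.Set α) (xs ys : List α) :
    PySem.Set.update s (xs ++ ys) = PySem.Set.update (PySem.Set.update s xs) ys := by
  simp [PySem.Set.update, List.foldl_append]

theorem pv_foldl_update {β α : Type} [BEq α] (xs : List β) (g : β → List α) (s : PySem.Set α) :
    xs.foldl (fun s i => PySem.Set.update s (g i)) s = PySem.Set.update s (xs.flatMap g) := by
  induction xs generalizing s with
  | nil => simp [PySem.Set.update]
  | cons x xs ih => rw [List.foldl_cons, List.flatMap_cons, pv_update_append, ih]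

theorem pv_update_empty {α : Type} [BEq α] (xs : List α) :
    PySem.Set.update PySem.Set.empty xs = PySem.Set.ofList xs := by
  rw [PySem.Set.ofList_eq_foldl]; rfl

theorem pv_filter_map_shape {β γ : Type} (l : List β) (g : β → Int) (p : Int → Bool) (f : Int → γ) :
    ((l.map g).filter p).map f = l.filterMap (fun x => if p (g x) then some (f (g x)) else none) := by
  induction l with
  | nil => rfl
  | cons x xs ih =>
    rw [List.map_cons, List.filter_cons, List.filterMap_cons]
    by_cases hp : p (g x) <;> simp [hp, ih]

theorem pv_str_slice_toList (s : String) (a b : Option Int) :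
    (PySem.Str.slice s a b).toList = PySem.List.slice s.toList a b := by
  simp [PySem.Str.slice]

theorem b_row_eq (Word : String) (i' : Nat) (h1 : i' < Word.toList.length) :
    ((PySem.List.pyRange ((Word.toList.length : Int) - (i':Int)) 1 (-1)).filter
        (fun L => PySem.List.pyGetD
          (tblAll Word.toList (Word.toList.length : Int) ((Word.toList.length : Int)+1))
          ((i':Int)*(Word.toList.length : Int) + ((i':Int) + L - 1)) false)).map
      (fun L => PySem.Str.slice Word (some (i':Int)) (some ((i':Int) + L)))
      = pvRow Word (i':Int) := by
  obtain ⟨hlen, hent⟩ := tblAll_inv Word.toList Word.toList.length (le_refl _)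
  unfold pvRow pvRowPart
  rw [PySem.Str.len_eq]
  rw [PySem.List.pyRange_neg_one ((Word.toList.length : Int) - (i':Int)) 1,
      PySem.List.pyRange_neg_one ((Word.toList.length : Int)) ((i':Int)+1)]
  rw [show ((Word.toList.length : Int) - ((i':Int)+1)).toNat
        = ((Word.toList.length : Int) - (i':Int) - 1).toNat from by omega]
  rw [pv_filter_map_shape, pv_filter_map_shape]
  apply List.filterMap_congr
  intro k hk
  rw [List.mem_range] at hk
  have hkN : (k:Int) < (Word.toList.length : Int) - (i':Int) - 1 := by omega
  have hkN' : k + i' + 1 < Word.toList.length := by omega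
  have harg : (i':Int) + (((Word.toList.length : Int) - (i':Int)) - (k:Int))
      = (Word.toList.length : Int) - (k:Int) := by ring
  rw [harg]
  have hidx : (i':Int)*(Word.toList.length : Int) + ((Word.toList.length : Int) - (k:Int) - 1)
      = ((i' * Word.toList.length + (Word.toList.length - k - 1) : Nat) : Int) := by
    push_cast
    omega
  have hs1 : i' ≤ Word.toList.length - k - 1 := by omega
  have hs2 : Word.toList.length - k - 1 < Word.toList.length := by omega
  have hcond : (tblAll Word.toList (Word.toList.length : Int) ((Word.toList.length : Int)+1)).getD
        (i' * Word.toList.length + (Word.toList.length - k - 1)) false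
      = check_palin (PySem.Str.slice Word (some (i':Int)) (some ((Word.toList.length : Int) - (k:Int)))) := by
    rw [hent i' (Word.toList.length - k - 1) hs1 hs2, if_pos (by omega)]
    simp only [show Word.toList.length - k - 1 + 1 = Word.toList.length - k from by omega]
    have hc : ((Word.toList.length : Int) - (k:Int)) = ((Word.toList.length - k : Nat) : Int) := by
      omega
    rw [hc, check_palin_eq, pv_str_slice_toList, PySem.List.slice_natCast]
    rfl
  rw [hidx, PySem.List.pyGetD_natCast, hcond]

theorem pv_flatMap_congr {α β : Type} (l : List α) (f g : α → List β)
    (h : ∀ x ∈ l, f x = g x) : l.flatMap f = l.flatMap g := by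
  rw [List.flatMap_def, List.flatMap_def, List.map_congr_left h]

theorem b_eq_canon (Word : String) : all_palindromes_alt Word = PySem.Set.ofList (pvRest Word 0) := by
  have hN := PySem.Str.len_eq Word
  show (PySem.List.pyRange 0 (PySem.Str.len Word) 1).foldl
      (fun seen i =>
        (PySem.List.pyRange (PySem.Str.len Word - i) 1 (-1)).foldl (fun seen L =>
          if PySem.List.pyGetD
              (tblAll Word.toList (PySem.Str.len Word) (PySem.Str.len Word + 1))
              (i*(PySem.Str.len Word) + (i + L - 1)) false
          then PySem.Set.add seen (PySem.Str.slice Word (some i) (some (i + L))) else seen) seen)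
      PySem.Set.empty = _
  simp only [pv_foldl_add_if]
  rw [pv_foldl_update, pv_update_empty]
  congr 1
  rw [hN]
  have hrows : (PySem.List.pyRange 0 ((Word.toList.length : Int)) 1).flatMap
      (fun i => ((PySem.List.pyRange ((Word.toList.length : Int) - i) 1 (-1)).filter
          (fun L => PySem.List.pyGetD
            (tblAll Word.toList (Word.toList.length : Int) ((Word.toList.length : Int)+1))
            (i*(Word.toList.length : Int) + (i + L - 1)) false)).map
        (fun L => PySem.Str.slice Word (some i) (some (i + L))))
      = (PySem.List.pyRange 0 ((Word.toList.length : Int)) 1).flatMap (pvRow Word) := by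
    apply pv_flatMap_congr
    intro x hx
    rw [PySem.List.mem_pyRange_one] at hx
    have hx' : x = ((x.toNat : Nat) : Int) := by omega
    rw [hx']
    exact b_row_eq Word x.toNat (by omega)
  rw [hrows]
  rcases Nat.eq_zero_or_pos Word.toList.length with hz | hpos
  · rw [hz]
    unfold pvRest
    rw [PySem.Str.len_eq, hz]
    rw [PySem.List.pyRange_one_eq_nil (by norm_num), PySem.List.pyRange_one_eq_nil (by norm_num)]
  · rw [show ((Word.toList.length : Nat) : Int) = ((Word.toList.length : Int) - 1) + 1 from by omega]
    rw [PySem.List.pyRange_one_succ_right (by omega), List.flatMap_append]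
    have hlast : pvRow Word ((Word.toList.length : Int) - 1) = [] := by
      unfold pvRow
      rw [PySem.Str.len_eq]
      unfold pvRowPart
      rw [show ((Word.toList.length : Int) - 1) + 1 = (Word.toList.length : Int) from by omega]
      rw [PySem.List.pyRange_neg_one_eq_nil (le_refl _)]
      rfl
    rw [List.flatMap_cons, List.flatMap_nil, hlast]
    unfold pvRest
    rw [PySem.Str.len_eq]
    simp

-- ===== VERDICT (by name: the statement is the Claim_ definition above) =====
theorem all_palindromes_spec : Claim_equal_all_palindromes := by
  intro Word _
  unfold Spec_all_palindromes
  rw [a_eq_canon, b_eq_canon]
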